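-- pv_equiv track=rewrite | github.com/shayoyou/TIL | coding_test/baekjoon/q_2775_부녀회장이될테야.py | solution
-- ===== SOURCE A (Python) =====
-- def solution(k, n):
--     arr = [i for i in range(1, n+1)]
--     for _ in range(0, k):
--         sum = 1
--         for j in range(1, n):
--             sum = sum + arr[j]
--             arr[j] = sum
--
--     return arr[n-1]
-- ===== SOURCE B (Python) =====
-- def solution(k, n):
--     # closed form: the answer is the binomial coefficient C(n+k, k+1),
--     # computed by an exact multiplicative loop of min(k+1, n-1) steps
--     floors = k if k > 0 else 0
--     r = min(floors + 1, n - 1)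
--     m = n + floors
--     c = 1
--     for i in range(1, r + 1):
--         c = c * (m - r + i) // i
--     return c
-- ===== Notes on version B (the rewrite author's own statement) =====
-- stated objective: faster
-- what changed: Replaces A's k rounds of in-place prefix-sum passes over the room array with a direct computation of the binomial coefficient C(n+k, k+1) via an exact multiplicative product loop.
import Mathlib
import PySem

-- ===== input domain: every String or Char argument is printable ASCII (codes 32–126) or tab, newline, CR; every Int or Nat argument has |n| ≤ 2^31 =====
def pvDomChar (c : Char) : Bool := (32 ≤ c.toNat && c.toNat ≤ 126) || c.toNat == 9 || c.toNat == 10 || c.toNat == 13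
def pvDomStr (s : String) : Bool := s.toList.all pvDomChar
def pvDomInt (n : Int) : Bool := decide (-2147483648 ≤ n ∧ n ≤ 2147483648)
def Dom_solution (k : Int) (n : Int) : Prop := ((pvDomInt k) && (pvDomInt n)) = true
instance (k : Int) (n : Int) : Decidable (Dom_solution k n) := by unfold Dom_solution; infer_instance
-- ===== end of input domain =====

-- B replaces A's k in-place prefix-sum passes by a direct product-form computation of the
-- binomial coefficient C(n+k, k+1); objective: faster (asymptotic, O(min(k,n)) vs O(k*n)).


-- ===== PORT A =====
-- body of A's inner loop: `sum = sum + arr[j]; arr[j] = sum` on state (sum, arr).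
-- The array is A's Python list `arr`; every j comes from range(1, n), so it is a
-- nonnegative in-range index and Nat access is exact there.
def solutionStep (st : Int × Array Int) (j : Int) : Int × Array Int :=
  let s := st.1 + st.2.getD j.toNat 0
  (s, st.2.set! j.toNat s)

-- one pass of A's outer loop: `sum = 1; for j in range(1, n): ...`
def solutionPass (n : Int) (arr : Array Int) : Array Int :=
  ((PySem.List.pyRange 1 n 1).foldl solutionStep (1, arr)).2

def solution (k : Int) (n : Int) : Int :=
  let arr0 := (PySem.List.pyRange 1 (n+1) 1).toArray
  let arr := (PySem.List.pyRange 0 k 1).foldl (fun a _ => solutionPass n a) arr0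
  PySem.List.pyGetD arr.toList (n-1) 0   -- arr[n-1]; total form used only under Pre_ (n ≥ 1)

-- ===== PORT B =====
def solution_alt (k : Int) (n : Int) : Int :=
  let floors := if k > 0 then k else 0
  let r := min (floors + 1) (n - 1)
  let m := n + floors
  (PySem.List.pyRange 1 (r+1) 1).foldl (fun c i => PySem.Int.floordiv (c * (m - r + i)) i) 1

-- ===== PRECONDITION & SPEC =====
-- Pre_ excludes exactly n ≤ 0, where A's `arr[n-1]` raises IndexError on the empty list.
def Pre_solution (_k : Int) (n : Int) : Prop := 1 ≤ n
instance (k : Int) (n : Int) : Decidable (Pre_solution k n) := by unfold Pre_solution; infer_instance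
def pvWitness_solution : Int × Int := (3, 4)

def Spec_solution (k : Int) (n : Int) (out : Int) : Prop := out = solution_alt k n
instance (k : Int) (n : Int) (out : Int) : Decidable (Spec_solution k n out) := by unfold Spec_solution; infer_instance

-- ===== CLAIM (what is proved, stated in full; the proofs are below) =====
def Claim_equal_solution : Prop := ∀ (k : Int) (n : Int), Dom_solution k n → Pre_solution k n → Spec_solution k n (solution k n)

-- ===== LEMMAS AND PROOFS =====

-- list-level model of A's loop body and pass (the array port is simulated against these)
def listStep (st : Int × List Int) (j : Int) : Int × List Int :=
  let s := st.1 + PySem.List.pyGetD st.2 j 0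
  (s, PySem.List.pySetD st.2 j s)

def listPass (n : Int) (arr : List Int) : List Int :=
  ((PySem.List.pyRange 1 n 1).foldl listStep (1, arr)).2

lemma step_sim (j : Int) (hj : 0 ≤ j) (s : Int) (l : List Int) :
    solutionStep (s, l.toArray) j = ((listStep (s, l) j).1, (listStep (s, l) j).2.toArray) := by
  simp only [solutionStep, listStep]
  rw [PySem.List.pyGetD_of_nonneg l 0 hj, PySem.List.pySetD_of_nonneg l _ hj]
  simp [Array.set!]

lemma foldl_sim (js : List Int) (hjs : ∀ j ∈ js, 0 ≤ j) : ∀ (s : Int) (l : List Int),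
    js.foldl solutionStep (s, l.toArray)
      = ((js.foldl listStep (s, l)).1, (js.foldl listStep (s, l)).2.toArray) := by
  induction js with
  | nil => intro s l; simp
  | cons j js ih =>
      intro s l
      rw [List.foldl_cons, step_sim j (hjs j (by simp)) s l, List.foldl_cons]
      have := ih (fun j h => hjs j (by simp [h])) (listStep (s, l) j).1 (listStep (s, l) j).2
      simpa using this

lemma pass_sim (n : Int) (l : List Int) : solutionPass n l.toArray = (listPass n l).toArray := by
  unfold solutionPass listPass
  rw [foldl_sim _ (fun j hj => by have := PySem.List.mem_pyRange_one.mp hj; omega) 1 l]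

lemma outer_sim (ks : List Int) (n : Int) (l : List Int) :
    ks.foldl (fun a _ => solutionPass n a) l.toArray
      = (ks.foldl (fun a _ => listPass n a) l).toArray := by
  induction ks generalizing l with
  | nil => rfl
  | cons x xs ih => rw [List.foldl_cons, List.foldl_cons, pass_sim, ih]

-- the value of room j (0-based) on floor t, as A's array holds it: C(j+t+1, t+1)
def rowF (t j : Nat) : Int := ((j + t + 1).choose (t + 1) : Int)
def row (t N : Nat) : List Int := (List.range N).map (rowF t)

-- array state in the middle of a pass: rooms 0..J already updated to floor t+1, the rest still floor t
def mixF (t J j : Nat) : Int :=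
  if j ≤ J then ((j + t + 2).choose (t + 2) : Int) else ((j + t + 1).choose (t + 1) : Int)

lemma set_map_range {f : Nat → Int} {N j : Nat} (v : Int) (_hjN : j < N) :
    ((List.range N).map f).set j v = (List.range N).map (fun i => if i = j then v else f i) := by
  apply List.ext_getElem (by simp)
  intro i h1 h2
  simp only [List.getElem_set, List.getElem_map, List.getElem_range]
  by_cases h : j = i
  · subst h; simp
  · rw [if_neg h, if_neg (fun hh => h hh.symm)]

lemma inner_inv (N t : Nat) (J : Nat) (hJ : J + 1 ≤ N) :
    (PySem.List.pyRange 1 ((J : Int) + 1) 1).foldl listStep (1, row t N)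
      = (((J + t + 2).choose (t + 2) : Int), (List.range N).map (mixF t J)) := by
  induction J with
  | zero =>
      rw [show ((0 : Nat) : Int) + 1 = 1 by norm_num, PySem.List.pyRange_one_eq_nil le_rfl]
      simp only [List.foldl_nil, Prod.mk.injEq]
      constructor
      · rw [show 0 + t + 2 = t + 2 by ring, Nat.choose_self]; norm_num
      · unfold row
        apply List.map_congr_left
        intro i _
        unfold rowF mixF
        rcases Nat.eq_zero_or_pos i with h | h
        · subst h
          rw [if_pos (le_refl 0), show 0 + t + 2 = t + 2 by ring,
              show 0 + t + 1 = t + 1 by ring, Nat.choose_self, Nat.choose_self]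
        · rw [if_neg (by omega)]
  | succ J ih =>
      have hJN : (J : Nat) + 1 < N := by omega
      rw [show ((J + 1 : Nat) : Int) + 1 = ((J : Int) + 1) + 1 by push_cast; ring,
          PySem.List.pyRange_one_succ_right (by omega), List.foldl_append, ih (by omega),
          List.foldl_cons, List.foldl_nil]
      rw [show ((J : Int) + 1) = ((J + 1 : Nat) : Int) by push_cast; ring]
      simp only [listStep, PySem.List.pyGetD_natCast, PySem.List.pySetD_natCast]
      rw [PySem.List.getD_map_range _ _ _ _ hJN]
      unfold mixF
      rw [if_neg (by omega)]
      have hsum : (((J + t + 2).choose (t + 2) : Nat) : Int) + ((J + 1 + t + 1).choose (t + 1) : Nat)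
          = (((J + 1) + t + 2).choose (t + 2) : Nat) := by
        have h : ((J + 1) + t + 2).choose (t + 2) = (J + t + 2).choose (t + 1) + (J + t + 2).choose (t + 2) := by
          rw [show (J + 1) + t + 2 = (J + t + 2) + 1 by ring, show t + 2 = (t + 1) + 1 by ring]
          exact Nat.choose_succ_succ _ _
        rw [show J + 1 + t + 1 = J + t + 2 by ring, h]
        push_cast
        ring
      rw [hsum, set_map_range _ hJN]
      refine Prod.mk.injEq .. ▸ ⟨rfl, ?_⟩
      apply List.map_congr_left
      intro i _
      by_cases h1 : i = J + 1
      · subst h1; rw [if_pos rfl, if_pos (le_refl _)]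
      · rw [if_neg h1]
        by_cases h2 : i ≤ J
        · rw [if_pos h2, if_pos (by omega)]
        · rw [if_neg h2, if_neg (by omega)]

lemma pass_row (N t : Nat) (hN : 1 ≤ N) :
    listPass (N : Int) (row t N) = row (t + 1) N := by
  unfold listPass
  rw [show (N : Int) = ((N - 1 : Nat) : Int) + 1 by omega, inner_inv N t (N - 1) (by omega)]
  unfold row
  apply List.map_congr_left
  intro i hi
  have hi' : i < N := List.mem_range.mp hi
  unfold mixF rowF
  rw [if_pos (by omega), show i + (t + 1) + 1 = i + t + 2 by ring,
      show t + 1 + 1 = t + 2 by ring]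

lemma outer_row (N : Nat) (hN : 1 ≤ N) (l : List Int) (t : Nat) :
    l.foldl (fun a _ => listPass (N : Int) a) (row t N) = row (t + l.length) N := by
  induction l generalizing t with
  | nil => simp
  | cons x xs ih =>
      rw [List.foldl_cons, pass_row N t hN, ih (t + 1), List.length_cons]
      congr 1
      omega

lemma solution_eq_choose (k n : Int) (hn : 1 ≤ n) :
    solution k n = ((n.toNat + k.toNat).choose (k.toNat + 1) : Int) := by
  obtain ⟨N, rfl⟩ : ∃ N : Nat, n = (N : Int) := ⟨n.toNat, by omega⟩
  have hN : 1 ≤ N := by omega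
  simp only [solution, Int.toNat_natCast]
  have h0 : PySem.List.pyRange 1 ((N : Int) + 1) 1 = row 0 N := by
    rw [PySem.List.pyRange_one]
    unfold row
    rw [show ((N : Int) + 1 - 1).toNat = N by omega]
    apply List.map_congr_left
    intro i _
    unfold rowF
    rw [show i + 0 + 1 = i + 1 by ring, show 0 + 1 = 1 by ring, Nat.choose_one_right]
    push_cast
    ring
  rw [h0, outer_sim, outer_row N hN _ 0, List.toList_toArray, PySem.List.length_pyRange_one,
      show ((k : Int) - 0).toNat = k.toNat by omega,
      show (N : Int) - 1 = ((N - 1 : Nat) : Int) by omega]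
  unfold row
  rw [PySem.List.pyGetD_natCast, PySem.List.getD_map_range _ _ _ _ (by omega)]
  unfold rowF
  rw [show N - 1 + (0 + k.toNat) + 1 = N + k.toNat by omega,
      show 0 + k.toNat + 1 = k.toNat + 1 by ring]

lemma prod_loop (M R : Nat) (hR : R ≤ M) (S : Nat) (hS : S ≤ R) :
    (PySem.List.pyRange 1 ((S : Int) + 1) 1).foldl
        (fun c i => PySem.Int.floordiv (c * ((M : Int) - (R : Int) + i)) i) 1
      = ((M - R + S).choose S : Int) := by
  induction S with
  | zero =>
      rw [show ((0 : Nat) : Int) + 1 = 1 by norm_num, PySem.List.pyRange_one_eq_nil le_rfl]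
      rw [List.foldl_nil, show M - R + 0 = M - R by ring, Nat.choose_zero_right]
      norm_num
  | succ S ih =>
      rw [show ((S + 1 : Nat) : Int) + 1 = ((S : Int) + 1) + 1 by push_cast; ring,
          PySem.List.pyRange_one_succ_right (by omega), List.foldl_append, ih (by omega),
          List.foldl_cons, List.foldl_nil]
      rw [show (M : Int) - (R : Int) + ((S : Int) + 1) = ((M - R + S + 1 : Nat) : Int) by omega,
          show ((S : Int) + 1) = ((S + 1 : Nat) : Int) by push_cast; ring,
          ← Nat.cast_mul, PySem.Int.floordiv_natCast]
      congr 1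
      have key := Nat.add_one_mul_choose_eq (M - R + S) S
      rw [show (M - R + S).choose S * (M - R + S + 1) = (M - R + S + 1) * (M - R + S).choose S by ring,
          key, Nat.mul_div_cancel _ (by omega : 0 < S + 1),
          show M - R + S + 1 = M - R + (S + 1) by ring]

lemma alt_eq_choose (k n : Int) (hn : 1 ≤ n) :
    solution_alt k n = ((n.toNat + k.toNat).choose (k.toNat + 1) : Int) := by
  obtain ⟨N, rfl⟩ : ∃ N : Nat, n = (N : Int) := ⟨n.toNat, by omega⟩
  have hN : 1 ≤ N := by omega
  simp only [solution_alt, Int.toNat_natCast]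
  have hf : (if k > 0 then k else 0) = (k.toNat : Int) := by split_ifs <;> omega
  rw [hf,
      show min ((k.toNat : Int) + 1) ((N : Int) - 1) = ((min (k.toNat + 1) (N - 1) : Nat) : Int) by omega,
      show (N : Int) + (k.toNat : Int) = ((N + k.toNat : Nat) : Int) by omega,
      prod_loop (N + k.toNat) (min (k.toNat + 1) (N - 1)) (by omega) _ le_rfl,
      Nat.sub_add_cancel (by omega)]
  rcases Nat.lt_or_ge (N - 1) (k.toNat + 1) with h | h
  · rw [min_eq_right (by omega),
        show N - 1 = (N + k.toNat) - (k.toNat + 1) by omega,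
        Nat.choose_symm (by omega)]
  · rw [min_eq_left (by omega)]

-- ===== VERDICT (by name: the statement is the Claim_ definition above) =====
theorem solution_spec : Claim_equal_solution := by
  intro k n _ hpre
  unfold Spec_solution
  rw [solution_eq_choose k n hpre, alt_eq_choose k n hpre]
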